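-- pv_equiv track=rewrite | github.com/Jyoungjo/Algorithm_python | 프로그래머스/2/92342. 양궁대회/양궁대회.py | solution
-- ===== SOURCE A (Python) =====
-- from itertools import product
--
-- def solution(n, info):
--     info = info[::-1]
--     answer = [-1]
--     max_v = 0
--     for win_lose in product((True, False), repeat=11):
--         t = 0
--         used_arrow = sum(info[i] + 1 for i in range(11) if win_lose[i])
--         if used_arrow <= n:
--             apeach = sum(i for i in range(11) if not win_lose[i] and info[i])
--             ryan = sum(i for i in range(11) if win_lose[i])
--             d = ryan - apeach
--             if d > max_v:
--                 max_v = d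
--                 answer = [info[i] + 1 if win_lose[i] else 0 for i in range(11)]
--                 answer[0] += n - used_arrow
--     answer = answer[::-1]
--     return answer
-- ===== SOURCE B (Python) =====
-- def solution(n, info):
--     # DFS over the 11 reversed rings, branching win-vs-concede and carrying
--     # remaining arrows and running scores instead of recomputing sums per mask.
--     rev = info[::-1]
--
--     def go(left, arrows, ryan, apeach, layout, best):
--         if left == 0:
--             d = ryan - apeach
--             if arrows >= 0 and d > best[0]:
--                 ans = layout[:]
--                 ans[0] += arrows
--                 return (d, ans)
--             return best
--         i = 11 - left
--         v = rev[i]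
--         best = go(left - 1, arrows - (v + 1), ryan + i, apeach, layout + [v + 1], best)
--         return go(left - 1, arrows, ryan, apeach + (i if v != 0 else 0), layout + [0], best)
--
--     best = go(11, n, 0, 0, [], (0, [-1]))
--     return best[1][::-1]
-- ===== Notes on version B (the rewrite author's own statement) =====
-- stated objective: alternative
-- what changed: Replaces the itertools.product enumeration of all 2^11 win/lose masks (recomputing three index sums over range(11) for each mask) with a recursive DFS over the 11 reversed rings that branches win-vs-concede and carries the remaining arrows, running scores and the partial layout as accumulators.
import Mathlib
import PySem

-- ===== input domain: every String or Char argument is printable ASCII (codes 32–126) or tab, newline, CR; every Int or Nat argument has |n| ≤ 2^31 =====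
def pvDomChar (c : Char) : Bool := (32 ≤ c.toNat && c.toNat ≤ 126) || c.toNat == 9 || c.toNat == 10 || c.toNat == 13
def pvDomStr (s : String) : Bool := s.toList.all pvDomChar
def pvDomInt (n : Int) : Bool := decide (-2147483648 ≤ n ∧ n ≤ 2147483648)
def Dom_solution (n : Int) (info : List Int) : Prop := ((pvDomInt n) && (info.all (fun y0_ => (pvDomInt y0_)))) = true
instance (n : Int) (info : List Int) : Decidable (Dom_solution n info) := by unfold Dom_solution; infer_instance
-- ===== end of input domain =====

-- B replaces A's 2^11 product enumeration (recomputing three index sums per mask) by a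
-- DFS over the 11 reversed rings that carries remaining arrows and running scores (alternative decomposition).

-- ===== PORT A =====
-- itertools.product((True, False), repeat=k): first component varies slowest, True before False
def pyProductTF : Nat → List (List Bool)
  | 0 => [[]]
  | k + 1 => (pyProductTF k).map (true :: ·) ++ (pyProductTF k).map (false :: ·)

def solution (n : Int) (info : List Int) : List Int :=
  let rev := info.reverse  -- info[::-1]  (PySem.List.slice?_none_none_neg_one)
  let idx := PySem.List.pyRange 0 11 1
  -- state = (max_v, answer); indexing is in range for every i in range(11) under Pre_
  let res := (pyProductTF 11).foldl (fun (st : Int × List Int) wl =>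
    let used := ((idx.filter (fun i => PySem.List.pyGetD wl i false)).map
        (fun i => PySem.List.pyGetD rev i 0 + 1)).sum
    if used ≤ n then
      let apeach := (idx.filter (fun i =>
          !(PySem.List.pyGetD wl i false) && decide (PySem.List.pyGetD rev i 0 ≠ 0))).sum
      let ryan := (idx.filter (fun i => PySem.List.pyGetD wl i false)).sum
      let d := ryan - apeach
      if d > st.1 then
        let ans := idx.map (fun i =>
          if PySem.List.pyGetD wl i false then PySem.List.pyGetD rev i 0 + 1 else 0)
        (d, ans.modify 0 (· + (n - used)))
      else st
    else st) (0, [-1])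
  res.2.reverse

-- ===== PORT B =====
-- ans[0] += a
def bump0 (xs : List Int) (a : Int) : List Int := xs.modify 0 (· + a)

-- go(left, arrows, ryan, apeach, layout, best); left = rings still to decide, current ring index i = 11 - left
def goB (rev : List Int) : Nat → Int → Int → Int → List Int → (Int × List Int) → (Int × List Int)
  | 0, arrows, ryan, apeach, layout, best =>
      let d := ryan - apeach
      if 0 ≤ arrows ∧ d > best.1 then (d, bump0 layout arrows) else best
  | left + 1, arrows, ryan, apeach, layout, best =>
      let i : Int := 11 - ((left : Int) + 1)
      let v := PySem.List.pyGetD rev i 0   -- rev[i]; in range for every reached i under Pre_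
      let best1 := goB rev left (arrows - (v + 1)) (ryan + i) apeach (layout ++ [v + 1]) best
      goB rev left arrows ryan (apeach + (if v ≠ 0 then i else 0)) (layout ++ [0]) best1

def solution_alt (n : Int) (info : List Int) : List Int :=
  let rev := info.reverse  -- info[::-1]  (PySem.List.slice?_none_none_neg_one)
  (goB rev 11 n 0 0 [] (0, [-1])).2.reverse

-- ===== PRECONDITION & SPEC =====
-- A indexes the reversed list at 0..10; on shorter lists it raises IndexError, so Pre_ is len ≥ 11.
def Pre_solution (n : Int) (info : List Int) : Prop := 11 ≤ info.length
instance (n : Int) (info : List Int) : Decidable (Pre_solution n info) := by unfold Pre_solution; infer_instance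
def pvWitness_solution : Int × List Int := (5, [2, 1, 1, 1, 0, 0, 0, 0, 0, 0, 0])

def Spec_solution (n : Int) (info : List Int) (out : List Int) : Prop := out = solution_alt n info
instance (n : Int) (info : List Int) (out : List Int) : Decidable (Spec_solution n info out) := by unfold Spec_solution; infer_instance

-- ===== CLAIM (what is proved, stated in full; the proofs are below) =====
def Claim_equal_solution : Prop := ∀ (n : Int) (info : List Int), Dom_solution n info → Pre_solution n info → Spec_solution n info (solution n info)

-- ===== LEMMAS AND PROOFS =====

-- list-form of the DFS (proof helper): walks the (index, count) pairs of the remaining rings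
def goBL : List (Int × Int) → Int → Int → Int → List Int → (Int × List Int) → (Int × List Int)
  | [], arrows, ryan, apeach, layout, best =>
      let d := ryan - apeach
      if 0 ≤ arrows ∧ d > best.1 then (d, bump0 layout arrows) else best
  | (i, v) :: rest, arrows, ryan, apeach, layout, best =>
      let best1 := goBL rest (arrows - (v + 1)) (ryan + i) apeach (layout ++ [v + 1]) best
      goBL rest arrows ryan (apeach + (if v ≠ 0 then i else 0)) (layout ++ [0]) best1

-- leaf quantities of a mask, accumulated pairwise (proof-only helpers)
def usedOf : List (Int × Int) → List Bool → Int
  | (_, v) :: ps, b :: bs => (if b then v + 1 else 0) + usedOf ps bs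
  | _, _ => 0
def ryanOf : List (Int × Int) → List Bool → Int
  | (i, _) :: ps, b :: bs => (if b then i else 0) + ryanOf ps bs
  | _, _ => 0
def apeachOf : List (Int × Int) → List Bool → Int
  | (i, v) :: ps, b :: bs => (if !b && decide (v ≠ 0) then i else 0) + apeachOf ps bs
  | _, _ => 0
def layoutOf : List (Int × Int) → List Bool → List Int
  | (_, v) :: ps, b :: bs => (if b then v + 1 else 0) :: layoutOf ps bs
  | _, _ => []

lemma sum_filter_map_eq (p : Int → Bool) (f : Int → Int) (l : List Int) :
    ((l.filter p).map f).sum = (l.map (fun i => if p i then f i else 0)).sum := by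
  induction l with
  | nil => simp
  | cons a t ih => by_cases h : p a <;> simp [h, ih]

lemma sum_filter_eq (p : Int → Bool) (l : List Int) :
    (l.filter p).sum = (l.map (fun i => if p i then i else 0)).sum := by
  induction l with
  | nil => simp
  | cons a t ih => by_cases h : p a <;> simp [h, ih]

lemma length_of_mem_pyProductTF : ∀ {k : Nat} {wl : List Bool}, wl ∈ pyProductTF k → wl.length = k := by
  intro k
  induction k with
  | zero => intro wl h; simp [pyProductTF] at h; simp [h]
  | succ m ih =>
    intro wl h
    simp only [pyProductTF, List.mem_append, List.mem_map] at h
    rcases h with ⟨t, ht, rfl⟩ | ⟨t, ht, rfl⟩ <;> simp [ih ht]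

lemma exists_of_len11 (l : List Bool) (h : l.length = 11) :
    ∃ b0 b1 b2 b3 b4 b5 b6 b7 b8 b9 b10,
      l = [b0, b1, b2, b3, b4, b5, b6, b7, b8, b9, b10] := by
  match l, h with
  | [b0, b1, b2, b3, b4, b5, b6, b7, b8, b9, b10], _ =>
    exact ⟨b0, b1, b2, b3, b4, b5, b6, b7, b8, b9, b10, rfl⟩

lemma exists_of_ge11 (l : List Int) (h : 11 ≤ l.length) :
    ∃ r0 r1 r2 r3 r4 r5 r6 r7 r8 r9 r10 rest,
      l = r0 :: r1 :: r2 :: r3 :: r4 :: r5 :: r6 :: r7 :: r8 :: r9 :: r10 :: rest := by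
  match l, h with
  | r0 :: r1 :: r2 :: r3 :: r4 :: r5 :: r6 :: r7 :: r8 :: r9 :: r10 :: rest, _ =>
    exact ⟨r0, r1, r2, r3, r4, r5, r6, r7, r8, r9, r10, rest, rfl⟩

lemma app_cons_layoutOf (l : List Int) (x : Int) (ps : List (Int × Int)) (wl : List Bool) :
    l ++ x :: layoutOf ps wl = (l ++ [x]) ++ layoutOf ps wl := by simp

-- the DFS computes the fold over all masks
lemma key (n : Int) : ∀ (ps : List (Int × Int)) (used ryan apeach : Int) (layout : List Int) (st : Int × List Int),
    (pyProductTF ps.length).foldl (fun st wl =>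
      if used + usedOf ps wl ≤ n then
        if (ryan + ryanOf ps wl) - (apeach + apeachOf ps wl) > st.1 then
          ((ryan + ryanOf ps wl) - (apeach + apeachOf ps wl),
            bump0 (layout ++ layoutOf ps wl) (n - (used + usedOf ps wl)))
        else st
      else st) st
    = goBL ps (n - used) ryan apeach layout st := by
  intro ps
  induction ps with
  | nil =>
    intro used ryan apeach layout st
    simp only [List.length_nil, pyProductTF, List.foldl_cons, List.foldl_nil,
      usedOf, ryanOf, apeachOf, layoutOf, add_zero, List.append_nil, goBL]
    by_cases h1 : used ≤ n
    · by_cases h2 : ryan - apeach > st.1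
      · simp [h1, h2]
      · simp [h1, h2]
    · simp [h1]
  | cons p ps ih =>
    obtain ⟨i, v⟩ := p
    intro used ryan apeach layout st
    rw [List.length_cons, pyProductTF, List.foldl_append, List.foldl_map, List.foldl_map]
    simp only [usedOf, ryanOf, apeachOf, layoutOf, Bool.not_true, Bool.not_false,
      Bool.false_and, Bool.true_and, if_true, decide_eq_true_eq]
    simp only [← add_assoc, app_cons_layoutOf]
    rw [ih, ih]
    conv_rhs => rw [goBL]
    simp only [sub_add_eq_sub_sub]
    simp

-- the index DFS equals the list DFS on the pairs of the remaining rings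
lemma goB_eq_goBL (rev : List Int) : ∀ (left : Nat) (arrows ryan apeach : Int) (layout : List Int) (best : Int × List Int),
    goB rev left arrows ryan apeach layout best
    = goBL ((PySem.List.pyRange (11 - (left : Int)) 11 1).map
        (fun j => (j, PySem.List.pyGetD rev j 0))) arrows ryan apeach layout best := by
  intro left
  induction left with
  | zero =>
    intro arrows ryan apeach layout best
    rw [PySem.List.pyRange_one_eq_nil (by omega)]
    rfl
  | succ l ih =>
    intro arrows ryan apeach layout best
    rw [goB, PySem.List.pyRange_one_cons (by omega), List.map_cons]
    have h : (11 - ((l : Int) + 1)) + 1 = 11 - (l : Int) := by push_cast; omega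
    rw [goBL]
    push_cast
    rw [h, ih, ih]

-- ===== VERDICT (by name: the statement is the Claim_ definition above) =====
set_option maxHeartbeats 2000000 in
theorem solution_spec : Claim_equal_solution := by
  intro n info _ hpre
  show solution n info = solution_alt n info
  have hlen : 11 ≤ info.reverse.length := by simpa using hpre
  obtain ⟨r0,r1,r2,r3,r4,r5,r6,r7,r8,r9,r10,rest,hrev⟩ := exists_of_ge11 info.reverse hlen
  have hidx : PySem.List.pyRange 0 11 1 = [0,1,2,3,4,5,6,7,8,9,10] := by decide
  simp only [solution, solution_alt, hrev, hidx]
  rw [goB_eq_goBL]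
  rw [show (11:Int) - ((11:Nat):Int) = 0 by norm_num, hidx]
  simp only [List.map_cons, List.map_nil, PySem.List.pyGetD_ofNat', List.getD_cons_zero,
    List.getD_cons_succ]
  have hk := key n [((0:Int),r0),(1,r1),(2,r2),(3,r3),(4,r4),(5,r5),(6,r6),(7,r7),(8,r8),(9,r9),(10,r10)] 0 0 0 [] ((0:Int),([-1]:List Int))
  simp only [List.length_cons, List.length_nil, zero_add, sub_zero, List.nil_append] at hk
  refine congrArg (fun p : Int × List Int => p.2.reverse) ?_
  rw [← hk]
  refine PySem.List.foldl_congr_mem' _ _ _ _ (fun wl hwl st => ?_)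
  obtain ⟨b0,b1,b2,b3,b4,b5,b6,b7,b8,b9,b10,rfl⟩ := exists_of_len11 wl (length_of_mem_pyProductTF hwl)
  rw [sum_filter_map_eq, sum_filter_eq, sum_filter_eq]
  simp only [usedOf, ryanOf, apeachOf, layoutOf, bump0, PySem.List.pyGetD_ofNat',
    List.map_cons, List.map_nil, List.sum_cons, List.sum_nil, List.getD_cons_zero,
    List.getD_cons_succ, List.modify, Bool.not_true, Bool.and_eq_true, Bool.not_eq_eq_eq_not,
    decide_eq_true_eq, add_zero]
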